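-- pv_equiv track=rewrite | github.com/nikdim03/LinkedInTelegramBot | src/job_posts/job_post_sender.py | split_markdown
-- ===== SOURCE A (Python) =====
-- def get_unclosed_tag(text: str) -> list:
--     tags = ["```", "`", "*", "_"]
--     stack = []
--     i = 0
--     while i < len(text):
--         if text[i] == '\\' and not stack:
--             i += 2
--             continue
--
--         if stack:
--             is_i_inceremented = False
--             current_tag = stack[-1]
--             if text.startswith(current_tag, i):
--                 is_i_inceremented = True
--                 i += len(current_tag)
--                 stack.pop()
--                 continue
--         else:
--             is_i_inceremented = False
--             for tag in tags:
--                 if text.startswith(tag, i):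
--                     stack.append(tag)
--                     is_i_inceremented = True
--                     i += len(tag)
--                     break
--         if not is_i_inceremented:
--             i += 1
--     return stack
--
-- def is_valid(text: str) -> bool:
--     return get_unclosed_tag(text) == []
--
-- def fix_markdown(text: str) -> str:
--     tags = get_unclosed_tag(text)
--     for tag in reversed(tags):
--         text += tag
--     return (text, tags)
--
-- def split_markdown(markdown: str, max_length: int = 4096) -> list:
--     chunks = []
--     tags = []
--     start = 0
--     while start < len(markdown):
--         end = start + max_length
--         if end >= len(markdown):
--             chunk = markdown[start:]
--             for tag in reversed(tags):
--                 chunk = tag + chunk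
--             if not is_valid(chunk):
--                 (chunk, tags) = fix_markdown(chunk)
--             chunks.append(chunk)
--             break
--
--         split_pos = markdown.rfind("\n", start, end)
--         if split_pos == -1 or split_pos == start:
--             split_pos = end
--
--         chunk = markdown[start:split_pos]
--         for tag in reversed(tags):
--             chunk = tag + chunk
--
--         if not is_valid(chunk):
--             (chunk, tags) = fix_markdown(chunk)
--
--         chunks.append(chunk)
--         start = split_pos
--
--     return chunks
-- ===== SOURCE B (Python) =====
-- def _unclosed(text):
--     """Unclosed-tag scanner: instead of A's pushdown stack stepping char by
--     char through tag bodies, jump straight to each closing delimiter with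
--     str.find; returns the single dangling tag or None."""
--     i, n = 0, len(text)
--     while i < n:
--         c = text[i]
--         if c == '\\':
--             i += 2
--         elif text.startswith('```', i):
--             j = text.find('```', i + 3)
--             if j == -1:
--                 return '```'
--             i = j + 3
--         elif c in '`*_':
--             j = text.find(c, i + 1)
--             if j == -1:
--                 return c
--             i = j + 1
--         else:
--             i += 1
--     return None
--
--
-- def split_markdown(markdown: str, max_length: int = 4096) -> list:
--     chunks = []
--     carry = ''          # tag left open by the previous chunk ('' = none)
--     start = 0
--     n = len(markdown)
--     while start < n:
--         end = start + max_length
--         if end >= n: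
--             split_pos = n
--         else:
--             split_pos = markdown.rfind('\n', start, end)
--             if split_pos == -1 or split_pos == start:
--                 split_pos = end
--         chunk = carry + markdown[start:split_pos]
--         t = _unclosed(chunk)
--         if t is not None:
--             chunk += t
--             carry = t
--         chunks.append(chunk)
--         start = split_pos
--     return chunks
-- ===== Notes on version B (the rewrite author's own statement) =====
-- stated objective: faster
-- what changed: B replaces A's pushdown stack scanner (which steps char by char through every tag body and is run up to three times per chunk via is_valid, fix_markdown and the reversed-prepend loop) by a stackless scanner that jumps straight to each closing delimiter with str.find, run exactly once per chunk inside a single fused loop.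
import Mathlib
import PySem

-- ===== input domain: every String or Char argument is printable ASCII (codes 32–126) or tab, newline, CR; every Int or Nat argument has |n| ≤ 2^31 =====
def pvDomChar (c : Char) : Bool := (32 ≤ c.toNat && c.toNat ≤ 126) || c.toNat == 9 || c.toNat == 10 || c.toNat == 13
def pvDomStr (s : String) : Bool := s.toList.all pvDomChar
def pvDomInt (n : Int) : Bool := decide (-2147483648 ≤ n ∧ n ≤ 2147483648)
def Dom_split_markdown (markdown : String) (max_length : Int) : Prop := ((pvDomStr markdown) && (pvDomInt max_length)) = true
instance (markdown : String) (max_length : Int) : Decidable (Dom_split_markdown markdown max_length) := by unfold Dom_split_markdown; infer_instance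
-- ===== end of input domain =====

-- B replaces A's pushdown stack scanner (run up to three times per chunk) by a stackless
-- scanner that jumps to each closing delimiter with str.find, once per chunk in one fused loop.

-- ===== PORT A =====
def pvTags : List (List Char) := [['`','`','`'], ['`'], ['*'], ['_']]

-- A's inner `for tag in tags: if text.startswith(tag, i): … break` search
def pvFindTag : List (List Char) → List Char → Nat → Option (List Char)
  | [], _, _ => none
  | t :: ts, text, i => if t.isPrefixOf (text.drop i) then some t else pvFindTag ts text i

-- A's while-loop in get_unclosed_tag; fuel (text.length + 1) dominates the iteration count
def pvGutLoop (text : List Char) : List (List Char) → Nat → Nat → List (List Char)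
  | stack, _, 0 => stack
  | stack, i, fuel+1 =>
    if i < text.length then
      if text.getD i ' ' = '\\' ∧ stack = [] then pvGutLoop text stack (i+2) fuel
      else
        match stack with
        | cur :: rest =>
          if cur.isPrefixOf (text.drop i) then pvGutLoop text rest (i + cur.length) fuel
          else pvGutLoop text (cur :: rest) (i+1) fuel
        | [] =>
          match pvFindTag pvTags text i with
          | some tag => pvGutLoop text [tag] (i + tag.length) fuel
          | none => pvGutLoop text [] (i+1) fuel
    else stack

def pvGut (text : List Char) : List (List Char) := pvGutLoop text [] 0 (text.length + 1)

def pvIsValid (text : List Char) : Bool := pvGut text == []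

def pvFix (text : List Char) : List Char × List (List Char) :=
  (( (pvGut text).reverse.foldl (fun t tag => t ++ tag) text), pvGut text)

-- A's `for tag in reversed(tags): chunk = tag + chunk`
def pvPrefixTags (tags : List (List Char)) (chunk : List Char) : List Char :=
  tags.reverse.foldl (fun c tag => tag ++ c) chunk

-- A's main while-loop; fuel (md.length + 1) dominates the iteration count whenever the Python terminates
def pvSplitLoop (md : List Char) (maxl : Int) : List (List Char) → List (List Char) → Int → Nat → List (List Char)
  | chunks, _, _, 0 => chunks
  | chunks, tags, start, fuel+1 =>
    if start < (md.length : Int) then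
      if start + maxl ≥ (md.length : Int) then
        let chunk := pvPrefixTags tags (PySem.List.slice md (some start) none)
        if pvIsValid chunk then chunks ++ [chunk] else chunks ++ [(pvFix chunk).1]
      else
        let sp0 := PySem.Chars.rfindFrom md ['\n'] start (some (start + maxl))
        let sp := if sp0 = -1 ∨ sp0 = start then start + maxl else sp0
        let chunk := pvPrefixTags tags (PySem.List.slice md (some start) (some sp))
        if pvIsValid chunk then pvSplitLoop md maxl (chunks ++ [chunk]) tags sp fuel
        else pvSplitLoop md maxl (chunks ++ [(pvFix chunk).1]) (pvFix chunk).2 sp fuel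
    else chunks

def split_markdown (markdown : String) (max_length : Int) : List String :=
  (pvSplitLoop markdown.toList max_length [] [] 0 (markdown.toList.length + 1)).map (fun c => String.ofList c)

-- ===== PORT B =====
-- B's _unclosed: stackless find-jump scanner (text.find(tag, i) = PySem.Chars.findFrom);
-- fuel (text.length + 1) dominates the iteration count (i grows by ≥ 1 each turn)
def pvUncB (text : List Char) : Nat → Nat → Option (List Char)
  | _, 0 => none
  | i, fuel+1 =>
    if i < text.length then
      if text.getD i ' ' = '\\' then pvUncB text (i+2) fuel
      else if ['`','`','`'].isPrefixOf (text.drop i) then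
        let j := PySem.Chars.findFrom text ['`','`','`'] ((i+3 : Nat) : Int) none
        if j = -1 then some ['`','`','`'] else pvUncB text (j.toNat + 3) fuel
      else if text.getD i ' ' = '`' ∨ text.getD i ' ' = '*' ∨ text.getD i ' ' = '_' then
        let j := PySem.Chars.findFrom text [text.getD i ' '] ((i+1 : Nat) : Int) none
        if j = -1 then some [text.getD i ' '] else pvUncB text (j.toNat + 1) fuel
      else pvUncB text (i+1) fuel
    else none

-- B's single fused while-loop; carry : List Char, [] = Python's ''
def pvSplitB (md : List Char) (maxl : Int) : List (List Char) → List Char → Int → Nat → List (List Char)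
  | chunks, _, _, 0 => chunks
  | chunks, carry, start, fuel+1 =>
    if start < (md.length : Int) then
      let sp := if (md.length : Int) ≤ start + maxl then (md.length : Int)
        else
          let sp0 := PySem.Chars.rfindFrom md ['\n'] start (some (start + maxl))
          if sp0 = -1 ∨ sp0 = start then start + maxl else sp0
      let chunk := carry ++ PySem.List.slice md (some start) (some sp)
      match pvUncB chunk 0 (chunk.length + 1) with
      | some t => pvSplitB md maxl (chunks ++ [chunk ++ t]) t sp fuel
      | none => pvSplitB md maxl (chunks ++ [chunk]) carry sp fuel
    else chunks

def split_markdown_alt (markdown : String) (max_length : Int) : List String :=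
  (pvSplitB markdown.toList max_length [] [] 0 (markdown.toList.length + 1)).map (fun c => String.ofList c)

-- ===== PRECONDITION & SPEC =====
-- Pre_ excludes nonempty markdown with max_length ≤ 0: there Python A never returns (start stops advancing
-- and the while-loop runs forever), so no return value is being claimed.
def Pre_split_markdown (markdown : String) (max_length : Int) : Prop :=
  markdown = "" ∨ 1 ≤ max_length
instance (markdown : String) (max_length : Int) : Decidable (Pre_split_markdown markdown max_length) := by
  unfold Pre_split_markdown; infer_instance

def pvWitness_split_markdown : String × Int := ("a*b\ncd", 4)

def Spec_split_markdown (markdown : String) (max_length : Int) (out : List String) : Prop := out = split_markdown_alt markdown max_length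
instance (markdown : String) (max_length : Int) (out : List String) : Decidable (Spec_split_markdown markdown max_length out) := by unfold Spec_split_markdown; infer_instance

-- ===== CLAIM (what is proved, stated in full; the proofs are below) =====
def Claim_equal_split_markdown : Prop := ∀ (markdown : String) (max_length : Int), Dom_split_markdown markdown max_length → Pre_split_markdown markdown max_length → Spec_split_markdown markdown max_length (split_markdown markdown max_length)

-- ===== LEMMAS AND PROOFS =====

-- intermediate single-open-tag automaton: A's stack never holds more than one element
def pvUncLoop (text : List Char) : Option (List Char) → Nat → Nat → Option (List Char)
  | o, _, 0 => o
  | o, i, fuel+1 =>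
    if i < text.length then
      match o with
      | some cur =>
        if cur.isPrefixOf (text.drop i) then pvUncLoop text none (i + cur.length) fuel
        else pvUncLoop text (some cur) (i+1) fuel
      | none =>
        if text.getD i ' ' = '\\' then pvUncLoop text none (i+2) fuel
        else if ['`','`','`'].isPrefixOf (text.drop i) then pvUncLoop text (some ['`','`','`']) (i+3) fuel
        else if text.getD i ' ' = '`' then pvUncLoop text (some ['`']) (i+1) fuel
        else if text.getD i ' ' = '*' then pvUncLoop text (some ['*']) (i+1) fuel
        else if text.getD i ' ' = '_' then pvUncLoop text (some ['_']) (i+1) fuel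
        else pvUncLoop text none (i+1) fuel
    else o

def pvUnclosed (text : List Char) : Option (List Char) := pvUncLoop text none 0 (text.length + 1)

def pvOptL : Option (List Char) → List (List Char)
  | none => []
  | some t => [t]

theorem pvSingle_prefix (text : List Char) (i : Nat) (c : Char) (h : i < text.length) :
    ([c] <+: text.drop i) ↔ text[i]'h = c := by
  rw [List.drop_eq_getElem_cons h, List.cons_prefix_cons]
  simp [eq_comm]

theorem pvGut_eq_unc (fuel : Nat) : ∀ (text : List Char) (i : Nat) (o : Option (List Char)),
    pvGutLoop text (pvOptL o) i fuel = pvOptL (pvUncLoop text o i fuel) := by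
  induction fuel with
  | zero => intro text i o; rfl
  | succ fuel ih =>
    intro text i o
    by_cases h : i < text.length
    · cases o with
      | some cur =>
        by_cases hp : cur <+: text.drop i
        · simpa [pvGutLoop, pvUncLoop, pvOptL, h, hp] using ih text (i + cur.length) none
        · simpa [pvGutLoop, pvUncLoop, pvOptL, h, hp] using ih text (i + 1) (some cur)
      | none =>
        by_cases hb : text[i]'h = '\\'
        · simpa [pvGutLoop, pvUncLoop, pvOptL, h, hb] using ih text (i + 2) none
        · by_cases h3 : (['`','`','`'] : List Char) <+: text.drop i
          · simpa [pvGutLoop, pvUncLoop, pvFindTag, pvTags, pvOptL, h, hb, h3] using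
              ih text (i + 3) (some ['`','`','`'])
          · by_cases h1 : text[i]'h = '`'
            · have h1' : (['`'] : List Char) <+: text.drop i := by
                rw [pvSingle_prefix text i '`' h]; exact h1
              simpa [pvGutLoop, pvUncLoop, pvFindTag, pvTags, pvOptL, h, hb, h3, h1, h1'] using
                ih text (i + 1) (some ['`'])
            · have h1' : ¬ (['`'] : List Char) <+: text.drop i := by
                rw [pvSingle_prefix text i '`' h]; exact h1
              by_cases h2 : text[i]'h = '*'
              · have h2' : (['*'] : List Char) <+: text.drop i := by
                  rw [pvSingle_prefix text i '*' h]; exact h2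
                simpa [pvGutLoop, pvUncLoop, pvFindTag, pvTags, pvOptL, h, hb, h3, h1, h1', h2, h2'] using
                  ih text (i + 1) (some ['*'])
              · have h2' : ¬ (['*'] : List Char) <+: text.drop i := by
                  rw [pvSingle_prefix text i '*' h]; exact h2
                by_cases h4 : text[i]'h = '_'
                · have h4' : (['_'] : List Char) <+: text.drop i := by
                    rw [pvSingle_prefix text i '_' h]; exact h4
                  simpa [pvGutLoop, pvUncLoop, pvFindTag, pvTags, pvOptL, h, hb, h3, h1, h1', h2, h2', h4, h4'] using
                    ih text (i + 1) (some ['_'])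
                · have h4' : ¬ (['_'] : List Char) <+: text.drop i := by
                    rw [pvSingle_prefix text i '_' h]; exact h4
                  simpa [pvGutLoop, pvUncLoop, pvFindTag, pvTags, pvOptL, h, hb, h3, h1, h1', h2, h2', h4, h4'] using
                    ih text (i + 1) none
    · cases o <;> simp [pvGutLoop, pvUncLoop, pvOptL, h]

theorem pvGut_optL (text : List Char) : pvGut text = pvOptL (pvUnclosed text) := by
  simpa [pvGut, pvUnclosed, pvOptL] using pvGut_eq_unc (text.length + 1) text 0 none

theorem pvFix_fst (t : List Char) (u : List Char) (h : pvUnclosed t = some u) :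
    (pvFix t).1 = t ++ u := by
  simp [pvFix, pvGut_optL, h, pvOptL]

theorem pvFix_snd (t : List Char) : (pvFix t).2 = pvOptL (pvUnclosed t) := by
  simp [pvFix, pvGut_optL]

theorem pvPrefix_optL (o : Option (List Char)) (c : List Char) :
    pvPrefixTags (pvOptL o) c = o.getD [] ++ c := by
  cases o <;> simp [pvPrefixTags, pvOptL]

theorem pvSlice_none_eq (xs : List Char) (a : Int) :
    PySem.List.slice xs (some a) none = PySem.List.slice xs (some a) (some (xs.length : Int)) := by
  simp [PySem.List.slice, PySem.List.clampIdx]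
  split_ifs <;> omega

-- findFrom facts
theorem pvFindFrom_len (s t : List Char) (ht : t ≠ []) :
    PySem.Chars.findFrom s t ((s.length : Nat) : Int) none = -1 := by
  rw [PySem.Chars.findFrom_natCast_eq_neg_one_iff s t s.length le_rfl]
  simp [List.infix_nil, ht]

theorem pvFindFrom_hit (s t : List Char) (i : Nat) (hi : i ≤ s.length)
    (hp : t <+: s.drop i) :
    PySem.Chars.findFrom s t (i : Int) none = (i : Int) := by
  have hne : PySem.Chars.findFrom s t (i : Int) none ≠ -1 := by
    intro h
    rw [PySem.Chars.findFrom_natCast_eq_neg_one_iff s t i hi] at h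
    exact h hp.isInfix
  obtain ⟨hle, hpre, hmin⟩ := PySem.Chars.findFrom_natCast_spec s t i hi hne
  have h0 : (0 : Int) ≤ PySem.Chars.findFrom s t (i : Int) none := le_trans (by positivity) hle
  have : ¬ (i < (PySem.Chars.findFrom s t (i : Int) none).toNat) := fun hlt => hmin i le_rfl hlt hp
  omega

theorem pvFindFrom_miss (s t : List Char) (i : Nat) (hi : i < s.length)
    (hp : ¬ t <+: s.drop i) :
    PySem.Chars.findFrom s t (i : Int) none = PySem.Chars.findFrom s t ((i+1 : Nat) : Int) none := by
  have hdrop : s.drop i = s[i]'hi :: s.drop (i+1) := List.drop_eq_getElem_cons hi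
  have hiff : (t <:+: s.drop i) ↔ (t <:+: s.drop (i+1)) := by
    rw [hdrop, List.infix_cons_iff]
    constructor
    · rintro (h | h)
      · exact absurd (hdrop ▸ h) hp
      · exact h
    · exact Or.inr
  by_cases hin : t <:+: s.drop (i+1)
  · have hne1 : PySem.Chars.findFrom s t (i : Int) none ≠ -1 := by
      intro h
      rw [PySem.Chars.findFrom_natCast_eq_neg_one_iff s t i (le_of_lt hi)] at h
      exact h (hiff.mpr hin)
    have hne2 : PySem.Chars.findFrom s t ((i+1 : Nat) : Int) none ≠ -1 := by
      intro h
      rw [PySem.Chars.findFrom_natCast_eq_neg_one_iff s t (i+1) hi] at h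
      exact h hin
    obtain ⟨hle1, hpre1, hmin1⟩ := PySem.Chars.findFrom_natCast_spec s t i (le_of_lt hi) hne1
    obtain ⟨hle2, hpre2, hmin2⟩ := PySem.Chars.findFrom_natCast_spec s t (i+1) hi hne2
    have h01 : (0 : Int) ≤ PySem.Chars.findFrom s t (i : Int) none := le_trans (by positivity) hle1
    have h02 : (0 : Int) ≤ PySem.Chars.findFrom s t ((i+1 : Nat) : Int) none := le_trans (by positivity) hle2
    -- r1 is an occurrence ≥ i, not at i, hence ≥ i+1; both minimal ⇒ equal
    have hr1i : ¬ ((PySem.Chars.findFrom s t (i : Int) none).toNat = i) := by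
      intro h; exact hp (h ▸ hpre1)
    have hge1 : i + 1 ≤ (PySem.Chars.findFrom s t (i : Int) none).toNat := by omega
    have hA : ¬ ((PySem.Chars.findFrom s t (i : Int) none).toNat <
        (PySem.Chars.findFrom s t ((i+1 : Nat) : Int) none).toNat) :=
      fun hlt => hmin2 _ hge1 hlt hpre1
    have hB : ¬ ((PySem.Chars.findFrom s t ((i+1 : Nat) : Int) none).toNat <
        (PySem.Chars.findFrom s t (i : Int) none).toNat) :=
      fun hlt => hmin1 _ (by omega) hlt hpre2
    omega
  · have h1 : PySem.Chars.findFrom s t (i : Int) none = -1 := by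
      rw [PySem.Chars.findFrom_natCast_eq_neg_one_iff s t i (le_of_lt hi)]
      exact fun h => hin (hiff.mp h)
    have h2 : PySem.Chars.findFrom s t ((i+1 : Nat) : Int) none = -1 := by
      rw [PySem.Chars.findFrom_natCast_eq_neg_one_iff s t (i+1) hi]
      exact hin
    rw [h1, h2]

-- A's tag-closing walk = one findFrom jump
theorem pvUnc_some_eq_find (text t : List Char) (ht : t ≠ []) :
    ∀ (fuel i : Nat), i ≤ text.length → text.length + 1 ≤ i + fuel →
    pvUncLoop text (some t) i fuel =
      (if PySem.Chars.findFrom text t (i : Int) none = -1 then some t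
       else pvUncLoop text none ((PySem.Chars.findFrom text t (i : Int) none).toNat + t.length)
              (fuel - ((PySem.Chars.findFrom text t (i : Int) none).toNat - i + 1))) := by
  intro fuel
  induction fuel with
  | zero => intro i h1 h2; omega
  | succ fuel ih =>
    intro i h1 h2
    by_cases hi : i < text.length
    · by_cases hp : t <+: text.drop i
      · have hf := pvFindFrom_hit text t i (le_of_lt hi) hp
        rw [hf, if_neg (show ¬ ((i : Int) = -1) by omega)]
        have harith : ((i : Int)).toNat = i := Int.toNat_natCast i
        simp [pvUncLoop, hi, hp, harith]
      · have hf := pvFindFrom_miss text t i hi hp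
        have hstep : pvUncLoop text (some t) i (fuel+1) = pvUncLoop text (some t) (i+1) fuel := by
          simp [pvUncLoop, hi, hp]
        rw [hstep, ih (i+1) (by omega) (by omega), hf]
        by_cases hneg : PySem.Chars.findFrom text t ((i+1 : Nat) : Int) none = -1
        · rw [if_pos hneg, if_pos hneg]
        · rw [if_neg hneg, if_neg hneg]
          obtain ⟨hle, _, _⟩ := PySem.Chars.findFrom_natCast_spec text t (i+1) hi hneg
          have h0 : (0:Int) ≤ PySem.Chars.findFrom text t ((i+1:Nat) : Int) none := le_trans (by positivity) hle
          have : (i+1 : Nat) ≤ (PySem.Chars.findFrom text t ((i+1:Nat) : Int) none).toNat := by omega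
          congr 1
          omega
    · have hil : i = text.length := by omega
      have hf : PySem.Chars.findFrom text t (i : Int) none = -1 := hil ▸ pvFindFrom_len text t ht
      simp [pvUncLoop, hi, hf]

-- none-mode: automaton = B's find-jump scanner
theorem pvUnc_none_eq_B (text : List Char) :
    ∀ (fB : Nat), ∀ (i fA : Nat), text.length + 1 ≤ i + fA → text.length + 1 ≤ i + fB →
    pvUncLoop text none i fA = pvUncB text i fB := by
  intro fB
  induction fB with
  | zero => intro i fA h1 h2
            have hi : ¬ i < text.length := by omega
            cases fA with
            | zero => rfl
            | succ fA => simp [pvUncLoop, pvUncB, hi]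
  | succ fB ih =>
    intro i fA h1 h2
    by_cases hi : i < text.length
    · obtain ⟨fA', rfl⟩ : ∃ a, fA = a + 1 := ⟨fA - 1, by omega⟩
      by_cases hb : text[i]'hi = '\\'
      · have hsA : pvUncLoop text none i (fA'+1) = pvUncLoop text none (i+2) fA' := by
          simp [pvUncLoop, hi, hb]
        have hsB : pvUncB text i (fB+1) = pvUncB text (i+2) fB := by
          simp [pvUncB, hi, hb]
        rw [hsA, hsB]
        exact ih (i+2) fA' (by omega) (by omega)
      · by_cases h3 : (['`','`','`'] : List Char) <+: text.drop i
        · have hlen3 : i + 3 ≤ text.length := by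
            have := h3.length_le; simp at this; omega
          have hsA : pvUncLoop text none i (fA'+1) = pvUncLoop text (some ['`','`','`']) (i+3) fA' := by
            simp [pvUncLoop, hi, hb, h3]
          have hsB : pvUncB text i (fB+1) =
              (if PySem.Chars.findFrom text ['`','`','`'] ((i+3 : Nat) : Int) none = -1 then some ['`','`','`']
               else pvUncB text ((PySem.Chars.findFrom text ['`','`','`'] ((i+3 : Nat) : Int) none).toNat + 3) fB) := by
            simp [pvUncB, hi, hb, h3]
          rw [hsA, hsB, pvUnc_some_eq_find text ['`','`','`'] (by simp) fA' (i+3) hlen3 (by omega)]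
          by_cases hneg : PySem.Chars.findFrom text ['`','`','`'] ((i+3 : Nat) : Int) none = -1
          · rw [if_pos hneg, if_pos hneg]
          · rw [if_neg hneg, if_neg hneg]
            obtain ⟨hle, hpre, _⟩ := PySem.Chars.findFrom_natCast_spec text ['`','`','`'] (i+3) hlen3 hneg
            have h0 : (0:Int) ≤ PySem.Chars.findFrom text ['`','`','`'] ((i+3:Nat) : Int) none := by omega
            have hj3 : i + 3 ≤ (PySem.Chars.findFrom text ['`','`','`'] ((i+3:Nat) : Int) none).toNat := by omega
            have hjlen : (PySem.Chars.findFrom text ['`','`','`'] ((i+3:Nat) : Int) none).toNat + 3 ≤ text.length := by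
              have := hpre.length_le
              simp only [List.length_cons, List.length_nil, List.length_drop] at this
              omega
            simp only [List.length_cons, List.length_nil]
            exact ih _ _ (by omega) (by omega)
        · by_cases hc : text[i]'hi = '`' ∨ text[i]'hi = '*' ∨ text[i]'hi = '_'
          · have hprefix : ([text[i]'hi] : List Char) <+: text.drop i :=
              (pvSingle_prefix text i _ hi).mpr rfl
            have hsA : pvUncLoop text none i (fA'+1) = pvUncLoop text (some [text[i]'hi]) (i+1) fA' := by
              rcases hc with h | h | h <;> simp [pvUncLoop, hi, h3, h]
            have hsB : pvUncB text i (fB+1) =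
                (if PySem.Chars.findFrom text [text[i]'hi] ((i+1 : Nat) : Int) none = -1 then some [text[i]'hi]
                 else pvUncB text ((PySem.Chars.findFrom text [text[i]'hi] ((i+1 : Nat) : Int) none).toNat + 1) fB) := by
              rcases hc with h | h | h <;> simp [pvUncB, hi, h3, h]
            rw [hsA, hsB, pvUnc_some_eq_find text [text[i]'hi] (by simp) fA' (i+1) (by omega) (by omega)]
            by_cases hneg : PySem.Chars.findFrom text [text[i]'hi] ((i+1 : Nat) : Int) none = -1
            · rw [if_pos hneg, if_pos hneg]
            · rw [if_neg hneg, if_neg hneg]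
              obtain ⟨hle, hpre, _⟩ := PySem.Chars.findFrom_natCast_spec text [text[i]'hi] (i+1) (by omega) hneg
              have h0 : (0:Int) ≤ PySem.Chars.findFrom text [text[i]'hi] ((i+1:Nat) : Int) none := by omega
              have hj1 : i + 1 ≤ (PySem.Chars.findFrom text [text[i]'hi] ((i+1:Nat) : Int) none).toNat := by omega
              have hjlen : (PySem.Chars.findFrom text [text[i]'hi] ((i+1:Nat) : Int) none).toNat + 1 ≤ text.length := by
                have := hpre.length_le
                simp only [List.length_cons, List.length_nil, List.length_drop] at this
                omega
              simp only [List.length_cons, List.length_nil]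
              exact ih _ _ (by omega) (by omega)
          · have hc1 : ¬ text[i]'hi = '`' := fun h => hc (Or.inl h)
            have hc2 : ¬ text[i]'hi = '*' := fun h => hc (Or.inr (Or.inl h))
            have hc3 : ¬ text[i]'hi = '_' := fun h => hc (Or.inr (Or.inr h))
            have hsA : pvUncLoop text none i (fA'+1) = pvUncLoop text none (i+1) fA' := by
              simp [pvUncLoop, hi, hb, h3, hc1, hc2, hc3]
            have hsB : pvUncB text i (fB+1) = pvUncB text (i+1) fB := by
              simp [pvUncB, hi, hb, h3, hc1, hc2, hc3]
            rw [hsA, hsB]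
            exact ih (i+1) fA' (by omega) (by omega)
    · cases fA with
      | zero => simp [pvUncLoop, pvUncB, hi]
      | succ fA => simp [pvUncLoop, pvUncB, hi]

theorem pvUnclosed_eq_B (text : List Char) :
    pvUnclosed text = pvUncB text 0 (text.length + 1) := by
  exact pvUnc_none_eq_B text (text.length + 1) 0 (text.length + 1) (by omega) (by omega)

-- the two main loops agree
theorem pvSplit_eq_B (md : List Char) (maxl : Int) :
    ∀ (fuel : Nat) (chunks : List (List Char)) (o : Option (List Char)) (start : Int),
    pvSplitLoop md maxl chunks (pvOptL o) start fuel = pvSplitB md maxl chunks (o.getD []) start fuel := by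
  intro fuel
  induction fuel with
  | zero => intro chunks o start; rfl
  | succ fuel ih =>
    intro chunks o start
    by_cases hs : start < (md.length : Int)
    · by_cases he : start + maxl ≥ (md.length : Int)
      · -- tail chunk: A breaks; B does one more iteration then exits
        simp only [pvSplitLoop, pvSplitB, if_pos hs, if_pos he]
        rw [pvSlice_none_eq, pvPrefix_optL]
        set chunk := o.getD [] ++ PySem.List.slice md (some start) (some (md.length : Int)) with hchunk
        rw [← pvUnclosed_eq_B]
        cases hu : pvUnclosed chunk with
        | none =>
          have hv : pvIsValid chunk = true := by simp [pvIsValid, pvGut_optL, hu, pvOptL]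
          rw [if_pos hv]
          cases fuel with
          | zero => rfl
          | succ fuel => simp [pvSplitB]
        | some t =>
          have hv : ¬ pvIsValid chunk = true := by simp [pvIsValid, pvGut_optL, hu, pvOptL]
          rw [if_neg hv, pvFix_fst chunk t hu]
          cases fuel with
          | zero => rfl
          | succ fuel => simp [pvSplitB]
      · simp only [pvSplitLoop, pvSplitB, if_pos hs, if_neg he]
        rw [pvPrefix_optL]
        set sp0 := PySem.Chars.rfindFrom md ['\n'] start (some (start + maxl)) with hsp0
        set sp := if sp0 = -1 ∨ sp0 = start then start + maxl else sp0 with hsp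
        set chunk := o.getD [] ++ PySem.List.slice md (some start) (some sp) with hchunk
        rw [← pvUnclosed_eq_B]
        cases hu : pvUnclosed chunk with
        | none =>
          have hv : pvIsValid chunk = true := by simp [pvIsValid, pvGut_optL, hu, pvOptL]
          rw [if_pos hv]
          exact ih (chunks ++ [chunk]) o sp
        | some t =>
          have hv : ¬ pvIsValid chunk = true := by simp [pvIsValid, pvGut_optL, hu, pvOptL]
          rw [if_neg hv, pvFix_fst chunk t hu, pvFix_snd, hu]
          exact ih (chunks ++ [chunk ++ t]) (some t) sp
    · simp [pvSplitLoop, pvSplitB, hs]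

-- ===== VERDICT (by name: the statement is the Claim_ definition above) =====
theorem split_markdown_spec : Claim_equal_split_markdown := by
  intro markdown max_length _hdom _hpre
  unfold Spec_split_markdown split_markdown split_markdown_alt
  have h := pvSplit_eq_B markdown.toList max_length (markdown.toList.length + 1) [] none 0
  simpa [pvOptL] using congrArg (List.map (fun c => String.ofList c)) h
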